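-- pv_equiv track=rewrite | github.com/yadinae/OpenLLM | src/context.py | _prune_reservoir
-- ===== SOURCE A (Python) =====
-- def _prune_reservoir(messages: list[dict], max_tokens: int) -> list[dict]:
--     if len(messages) <= 4:
--         return messages
--
--     system_msgs = [m for m in messages if m.get("role") == "system"]
--     user_msgs = [m for m in messages if m.get("role") == "user"]
--     assistant_msgs = [m for m in messages if m.get("role") == "assistant"]
--
--     recent = []
--     if system_msgs:
--         recent.append(system_msgs[-1])
--
--     if user_msgs:
--         recent.append(user_msgs[-1])
--     if assistant_msgs:
--         recent.append(assistant_msgs[-1])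
--
--     history = []
--     for i, msg in enumerate(messages[:-2]):
--         if len(history) >= 4:
--             break
--         history.append(msg)
--
--     return history + recent
-- ===== SOURCE B (Python) =====
-- def _prune_reservoir(messages: list[dict], max_tokens: int) -> list[dict]:
--     if len(messages) <= 4:
--         return messages
--
--     # scan once from the newest message backwards, grabbing the first hit per
--     # role and stopping as soon as all three slots are filled
--     sys = usr = asst = None
--     for m in reversed(messages):
--         r = m.get("role")
--         if r == "system" and sys is None:
--             sys = m
--         if r == "user" and usr is None:
--             usr = m
--         if r == "assistant" and asst is None:
--             asst = m
--         if sys is not None and usr is not None and asst is not None: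
--             break
--
--     recent = [m for m in (sys, usr, asst) if m is not None]
--     return messages[:-2][:4] + recent
-- ===== Notes on version B (the rewrite author's own statement) =====
-- stated objective: alternative
-- what changed: Instead of three forward filter passes that each build a whole per-role list, B scans the message list once backwards, capturing the first hit per role into three slots and stopping early once all three are filled; history becomes the plain slice messages[:-2][:4].
import Mathlib
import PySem

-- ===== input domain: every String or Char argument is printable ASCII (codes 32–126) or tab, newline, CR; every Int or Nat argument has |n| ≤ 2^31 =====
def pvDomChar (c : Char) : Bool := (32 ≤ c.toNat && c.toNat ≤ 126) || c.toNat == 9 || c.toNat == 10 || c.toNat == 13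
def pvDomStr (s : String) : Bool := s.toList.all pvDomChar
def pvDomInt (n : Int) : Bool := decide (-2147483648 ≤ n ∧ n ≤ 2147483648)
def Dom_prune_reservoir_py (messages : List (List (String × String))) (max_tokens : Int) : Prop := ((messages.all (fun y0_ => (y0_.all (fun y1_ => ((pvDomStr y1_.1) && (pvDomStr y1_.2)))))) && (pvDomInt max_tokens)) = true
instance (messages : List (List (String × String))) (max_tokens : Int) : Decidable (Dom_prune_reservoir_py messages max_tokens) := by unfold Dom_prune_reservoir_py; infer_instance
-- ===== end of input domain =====

-- B replaces A's three forward role-filter passes by a single backwards scan with early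
-- exit that captures the first hit per role into three slots (alternative; same cost).

-- ===== PORT A =====
-- the 'for i, msg in enumerate(messages[:-2]): if len(history) >= 4: break; history.append(msg)' loop
def pruneHistLoop : List (List (String × String)) → List (List (String × String)) → List (List (String × String))
  | [], history => history
  | msg :: rest, history =>
      if 4 ≤ history.length then history
      else pruneHistLoop rest (history ++ [msg])

def prune_reservoir_py (messages : List (List (String × String))) (max_tokens : Int) : List (List (String × String)) :=
  if messages.length ≤ 4 then messages
  else
    let system_msgs := messages.filter (fun m => (PySem.Dict.mk m).get? "role" == some "system")
    let user_msgs := messages.filter (fun m => (PySem.Dict.mk m).get? "role" == some "user")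
    let assistant_msgs := messages.filter (fun m => (PySem.Dict.mk m).get? "role" == some "assistant")
    let recent : List (List (String × String)) := []
    let recent := match system_msgs.getLast? with
      | some m => recent ++ [m]
      | none => recent
    let recent := match user_msgs.getLast? with
      | some m => recent ++ [m]
      | none => recent
    let recent := match assistant_msgs.getLast? with
      | some m => recent ++ [m]
      | none => recent
    let history := pruneHistLoop (PySem.List.slice messages none (some (-2))) []
    history ++ recent

-- ===== PORT B =====
-- the backwards for-loop: first hit per role into three Option slots, break once all filled
def scanBack : List (List (String × String)) → Option (List (String × String)) →
    Option (List (String × String)) → Option (List (String × String)) →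
    Option (List (String × String)) × Option (List (String × String)) × Option (List (String × String))
  | [], s, u, a => (s, u, a)
  | m :: rest, s, u, a =>
      let r := (PySem.Dict.mk m).get? "role"
      let s' := if r == some "system" && s.isNone then some m else s
      let u' := if r == some "user" && u.isNone then some m else u
      let a' := if r == some "assistant" && a.isNone then some m else a
      if s'.isSome && u'.isSome && a'.isSome then (s', u', a')
      else scanBack rest s' u' a'

def prune_reservoir_py_alt (messages : List (List (String × String))) (max_tokens : Int) : List (List (String × String)) :=
  if messages.length ≤ 4 then messages
  else
    let (s, u, a) := scanBack messages.reverse none none none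
    let recent := ([s, u, a].filterMap id)
    PySem.List.slice (PySem.List.slice messages none (some (-2))) none (some 4) ++ recent

-- ===== PRECONDITION & SPEC =====
def Spec_prune_reservoir_py (messages : List (List (String × String))) (max_tokens : Int) (out : List (List (String × String))) : Prop := out = prune_reservoir_py_alt messages max_tokens
instance (messages : List (List (String × String))) (max_tokens : Int) (out : List (List (String × String))) : Decidable (Spec_prune_reservoir_py messages max_tokens out) := by unfold Spec_prune_reservoir_py; infer_instance

-- ===== CLAIM (what is proved, stated in full; the proofs are below) =====
def Claim_equal_prune_reservoir_py : Prop := ∀ (messages : List (List (String × String))) (max_tokens : Int), Dom_prune_reservoir_py messages max_tokens → Spec_prune_reservoir_py messages max_tokens (prune_reservoir_py messages max_tokens)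

-- ===== LEMMAS AND PROOFS =====

lemma getLast?_cons_or {α : Type} (a : α) (l : List α) :
    (a :: l).getLast? = l.getLast?.or (some a) := by
  induction l generalizing a with
  | nil => simp
  | cons b l ih =>
      rw [List.getLast?_cons_cons, ih b]
      cases h : l.getLast? <;> simp [Option.or]

-- the first match scanning backwards is the last match of the forward filter
lemma find?_reverse_eq_getLast?_filter {α : Type} (p : α → Bool) (l : List α) :
    l.reverse.find? p = (l.filter p).getLast? := by
  induction l with
  | nil => simp
  | cons a l ih =>
      rw [List.reverse_cons, List.find?_append, ih, List.filter_cons]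
      cases hp : p a
      · simp [List.find?, hp]
      · rw [if_pos rfl, getLast?_cons_or]
        simp [List.find?, hp]

-- one step of the slot update commutes with Option.or of the pending find?
lemma slot_step_or {α : Type} (p : α → Bool) (s : Option α) (m : α) (rest : List α) :
    (if p m && s.isNone then some m else s).or (rest.find? p) = s.or ((m :: rest).find? p) := by
  cases s <;> cases hp : p m <;> simp [List.find?, hp]

lemma scanBack_eq (xs : List (List (String × String)))
    (s u a : Option (List (String × String))) :
    scanBack xs s u a =
      (s.or (xs.find? (fun m => (PySem.Dict.mk m).get? "role" == some "system")),
       u.or (xs.find? (fun m => (PySem.Dict.mk m).get? "role" == some "user")),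
       a.or (xs.find? (fun m => (PySem.Dict.mk m).get? "role" == some "assistant"))) := by
  induction xs generalizing s u a with
  | nil => simp [scanBack]
  | cons m rest ih =>
      rw [scanBack]
      set s' := if ((PySem.Dict.mk m).get? "role" == some "system") && s.isNone then some m else s with hs'
      set u' := if ((PySem.Dict.mk m).get? "role" == some "user") && u.isNone then some m else u with hu'
      set a' := if ((PySem.Dict.mk m).get? "role" == some "assistant") && a.isNone then some m else a with ha'
      have es : s'.or (rest.find? (fun m => (PySem.Dict.mk m).get? "role" == some "system"))
          = s.or ((m :: rest).find? (fun m => (PySem.Dict.mk m).get? "role" == some "system")) := by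
        rw [hs']; exact slot_step_or (fun m => (PySem.Dict.mk m).get? "role" == some "system") s m rest
      have eu : u'.or (rest.find? (fun m => (PySem.Dict.mk m).get? "role" == some "user"))
          = u.or ((m :: rest).find? (fun m => (PySem.Dict.mk m).get? "role" == some "user")) := by
        rw [hu']; exact slot_step_or (fun m => (PySem.Dict.mk m).get? "role" == some "user") u m rest
      have ea : a'.or (rest.find? (fun m => (PySem.Dict.mk m).get? "role" == some "assistant"))
          = a.or ((m :: rest).find? (fun m => (PySem.Dict.mk m).get? "role" == some "assistant")) := by
        rw [ha']; exact slot_step_or (fun m => (PySem.Dict.mk m).get? "role" == some "assistant") a m rest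
      by_cases hall : (s'.isSome && u'.isSome && a'.isSome) = true
      · rw [if_pos hall]
        obtain ⟨⟨hs, hu⟩, ha⟩ := by simpa [Bool.and_eq_true] using hall
        rw [← es, ← eu, ← ea,
          Option.isSome_iff_exists.mp hs |>.choose_spec,
          Option.isSome_iff_exists.mp hu |>.choose_spec,
          Option.isSome_iff_exists.mp ha |>.choose_spec]
        simp [Option.or]
      · rw [if_neg hall, ih, es, eu, ea]

lemma pruneHistLoop_eq (xs h : List (List (String × String))) :
    pruneHistLoop xs h = h ++ xs.take (4 - h.length) := by
  induction xs generalizing h with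
  | nil => simp [pruneHistLoop]
  | cons m rest ih =>
      by_cases hl : 4 ≤ h.length
      · simp [pruneHistLoop, hl, Nat.sub_eq_zero_of_le hl]
      · have h4 : 4 - h.length = (4 - (h.length + 1)) + 1 := by omega
        simp only [pruneHistLoop, if_neg hl, ih]
        rw [h4, List.take_succ_cons]
        simp

lemma slice_neg2_take (xs : List (List (String × String))) :
    PySem.List.slice xs none (some (-2)) = xs.take (xs.length - 2) := by
  exact PySem.List.slice_to_neg_ofNat xs 2 (by omega)

-- ===== VERDICT (by name: the statement is the Claim_ definition above) =====
theorem prune_reservoir_py_spec : Claim_equal_prune_reservoir_py := by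
  intro messages max_tokens _
  unfold Spec_prune_reservoir_py prune_reservoir_py prune_reservoir_py_alt
  by_cases hlen : messages.length <= 4
  · simp [hlen]
  · simp only [if_neg hlen]
    rw [scanBack_eq]
    simp only [Option.none_or]
    rw [find?_reverse_eq_getLast?_filter, find?_reverse_eq_getLast?_filter,
      find?_reverse_eq_getLast?_filter]
    rw [pruneHistLoop_eq, slice_neg2_take,
      PySem.List.slice_to (xs := messages.take (messages.length - 2)) (b := 4) (by omega)]
    simp only [List.nil_append, List.length_nil, Nat.sub_zero]
    rw [show ((4:Int).toNat) = 4 from rfl]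
    cases (messages.filter (fun m => (PySem.Dict.mk m).get? "role" == some "system")).getLast? <;>
    cases (messages.filter (fun m => (PySem.Dict.mk m).get? "role" == some "user")).getLast? <;>
    cases (messages.filter (fun m => (PySem.Dict.mk m).get? "role" == some "assistant")).getLast? <;>
      simp
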